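-- pv_equiv track=rewrite | github.com/daniel06smith/CMPT125 | Assignment_2/python_versions/a2_question1.py | replace_digits_recursive
-- ===== SOURCE A (Python) =====
-- def replace_digits_recursive(number: int, target: str, replacement: str):
--     negative = 0
--
--     if number < 0:
--         negative = 1 # Raise negative flag
--         number = -number # Make number positive temporarily
--
--     if (target < '0' or target > '9' or replacement < '0' or replacement > '9'):
--         return number # Returns original number when input is invalid.
--
--     # Base Case
--     if number == 0:
--         return 0 # Returns 0 if the number is 0.
--
--     # Extracting last digit of the number
--     last_digit = number % 10
--     if last_digit == int(target):
--         last_digit = int(replacement)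
--
--     # Calling recursive function over the rest of the number
--     rest_of_number = replace_digits_recursive(number // 10, target, replacement)
--
--     if rest_of_number is None:
--         rest_of_number = 0
--
--     result = rest_of_number * 10 + last_digit
--
--     # Reverting number to negative if flag was raised
--     if negative == 1:
--         result = -result
--
--     return result
-- ===== SOURCE B (Python) =====
-- def replace_digits_recursive(number: int, target: str, replacement: str):
--     # Iterative digit-extraction version: %10/%//10 loop, rebuild in original order.
--     negative = number < 0
--     n = -number if negative else number
--     if target < '0' or target > '9' or replacement < '0' or replacement > '9':
--         return n  # invalid input: A returns the (made-positive) number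
--     if n == 0:
--         return 0
--     t = int(target)
--     r = int(replacement)
--     digits = []  # least-significant first
--     while n > 0:
--         d = n % 10
--         digits.append(r if d == t else d)
--         n //= 10
--     result = 0
--     for d in reversed(digits):
--         result = result * 10 + d
--     return -result if negative else result
-- ===== Notes on version B (the rewrite author's own statement) =====
-- stated objective: alternative
-- what changed: Replaces A's recursion with an iterative %10-//10 digit-extraction loop that collects (possibly replaced) digits and rebuilds the integer by folding over them in original order; target/replacement are parsed once up front instead of at every recursion level.
-- outside the precondition, e.g. on replace_digits_recursive(12, '3', '4x'): A returns 12, B raises ValueError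
import Mathlib
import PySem

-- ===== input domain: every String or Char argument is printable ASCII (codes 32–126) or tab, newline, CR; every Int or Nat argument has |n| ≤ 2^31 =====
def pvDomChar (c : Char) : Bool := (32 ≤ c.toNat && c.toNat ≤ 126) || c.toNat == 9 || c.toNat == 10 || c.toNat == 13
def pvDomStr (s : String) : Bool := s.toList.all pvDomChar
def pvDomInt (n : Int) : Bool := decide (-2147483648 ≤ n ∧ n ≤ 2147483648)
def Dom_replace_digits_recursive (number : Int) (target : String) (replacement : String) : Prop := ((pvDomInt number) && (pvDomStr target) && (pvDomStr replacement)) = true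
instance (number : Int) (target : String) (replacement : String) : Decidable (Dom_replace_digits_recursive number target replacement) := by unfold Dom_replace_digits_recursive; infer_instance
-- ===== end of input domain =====

-- B replaces A's recursion with an iterative digit-extraction loop (parse target/replacement once,
-- collect replaced digits, rebuild by a fold); equivalence on inputs where Python A returns (Pre_).


-- ===== PORT A =====
-- termination helper for A's well-founded recursion (cited by name in decreasing_by)
theorem pv_decA (number : Int) (h2 : ¬ (if number < 0 then -number else number) = 0) :
    (PySem.Int.floordiv (if number < 0 then -number else number) 10).natAbs < number.natAbs := by
  by_cases hn : number < 0
  · rw [if_pos hn] at h2 ⊢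
    rw [PySem.Int.floordiv_eq_ediv_of_pos (by omega)]; omega
  · rw [if_neg hn] at h2 ⊢
    rw [PySem.Int.floordiv_eq_ediv_of_pos (by omega)]; omega

-- int(target)/int(replacement) are ported as (PySem.Int.ofStr? _).getD 0; Pre_ excludes the
-- inputs on which Python's int() raises, so the default is never reached under Pre_.
def replace_digits_recursive (number : Int) (target : String) (replacement : String) : Int :=
  let negative : Int := if number < 0 then 1 else 0
  let n : Int := if number < 0 then -number else number
  if target.toList < "0".toList ∨ "9".toList < target.toList ∨ replacement.toList < "0".toList ∨ "9".toList < replacement.toList then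
    n
  else if n = 0 then
    0
  else
    let last_digit := PySem.Int.mod n 10
    let last_digit := if last_digit = (PySem.Int.ofStr? target).getD 0
                      then (PySem.Int.ofStr? replacement).getD 0 else last_digit
    let rest_of_number := replace_digits_recursive (PySem.Int.floordiv n 10) target replacement
    let result := rest_of_number * 10 + last_digit
    if negative = 1 then -result else result
termination_by number.natAbs
decreasing_by
  exact pv_decA number (by assumption)

-- ===== PORT B =====
-- the while loop of Source B: extract digits low→high, replacing a digit equal to t by r
def pvDigitsRep (t r : Int) (n : Int) : List Int :=
  if 0 < n then
    (if PySem.Int.mod n 10 = t then r else PySem.Int.mod n 10) ::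
      pvDigitsRep t r (PySem.Int.floordiv n 10)
  else
    []
termination_by n.natAbs
decreasing_by
  rw [PySem.Int.floordiv_eq_ediv_of_pos (by omega)]; omega

def replace_digits_recursive_alt (number : Int) (target : String) (replacement : String) : Int :=
  let n : Int := if number < 0 then -number else number
  if target.toList < "0".toList ∨ "9".toList < target.toList ∨ replacement.toList < "0".toList ∨ "9".toList < replacement.toList then
    n
  else if n = 0 then
    0
  else
    let t := (PySem.Int.ofStr? target).getD 0
    let r := (PySem.Int.ofStr? replacement).getD 0
    let result := (pvDigitsRep t r n).reverse.foldl (fun acc d => acc * 10 + d) 0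
    if number < 0 then -result else result

-- ===== PRECONDITION & SPEC =====
-- Pre_ excludes exactly the inputs on which Python's int(target)/int(replacement) can raise
-- ValueError: the validity gate passed, the number is nonzero, and one of the two strings is not
-- int-parseable (A raises there, or — when no digit matches the unparseable replacement's target —
-- returns while B's eager parse raises).
def Pre_replace_digits_recursive (number : Int) (target : String) (replacement : String) : Prop :=
  (target.toList < "0".toList ∨ "9".toList < target.toList ∨ replacement.toList < "0".toList ∨ "9".toList < replacement.toList) ∨
  number = 0 ∨
  ((PySem.Int.ofStr? target).isSome ∧ (PySem.Int.ofStr? replacement).isSome)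
instance (number : Int) (target : String) (replacement : String) : Decidable (Pre_replace_digits_recursive number target replacement) := by unfold Pre_replace_digits_recursive; infer_instance

def pvWitness_replace_digits_recursive : Int × String × String := (-123, "2", "9")

def Spec_replace_digits_recursive (number : Int) (target : String) (replacement : String) (out : Int) : Prop := out = replace_digits_recursive_alt number target replacement
instance (number : Int) (target : String) (replacement : String) (out : Int) : Decidable (Spec_replace_digits_recursive number target replacement out) := by unfold Spec_replace_digits_recursive; infer_instance

-- ===== CLAIM (what is proved, stated in full; the proofs are below) =====
def Claim_equal_replace_digits_recursive : Prop := ∀ (number : Int) (target : String) (replacement : String), Dom_replace_digits_recursive number target replacement → Pre_replace_digits_recursive number target replacement → Spec_replace_digits_recursive number target replacement (replace_digits_recursive number target replacement)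

-- ===== LEMMAS AND PROOFS =====

-- peeling one digit off B's rebuild-fold
theorem pv_fold_step (t r n : Int) (hn : 0 < n) :
    (pvDigitsRep t r n).reverse.foldl (fun acc d => acc * 10 + d) 0 =
      (pvDigitsRep t r (PySem.Int.floordiv n 10)).reverse.foldl (fun acc d => acc * 10 + d) 0 * 10 +
        (if PySem.Int.mod n 10 = t then r else PySem.Int.mod n 10) := by
  conv_lhs => rw [pvDigitsRep.eq_def]
  simp [hn]

-- A's recursion on a nonnegative number equals B's rebuild-fold over the replaced digit list.
theorem pv_main (target replacement : String)
    (hg : ¬ (target.toList < "0".toList ∨ "9".toList < target.toList ∨ replacement.toList < "0".toList ∨ "9".toList < replacement.toList))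
    (n : Int) (hn : 0 ≤ n) :
    replace_digits_recursive n target replacement =
      (pvDigitsRep ((PySem.Int.ofStr? target).getD 0) ((PySem.Int.ofStr? replacement).getD 0) n).reverse.foldl
        (fun acc d => acc * 10 + d) 0 := by
  rw [replace_digits_recursive.eq_def]
  simp only [if_neg (show ¬ n < 0 by omega), if_neg hg]
  by_cases h0 : n = 0
  · rw [if_pos h0, h0, pvDigitsRep.eq_def]
    simp
  · rw [if_neg h0,
        pv_main target replacement hg (PySem.Int.floordiv n 10)
          (by rw [PySem.Int.floordiv_eq_ediv_of_pos (by omega)]; omega),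
        pv_fold_step _ _ n (by omega)]
    norm_num
termination_by n.natAbs
decreasing_by
  rw [PySem.Int.floordiv_eq_ediv_of_pos (by omega)]; omega

-- ===== VERDICT (by name: the statement is the Claim_ definition above) =====
theorem replace_digits_recursive_spec : Claim_equal_replace_digits_recursive := by
  intro number target replacement _ _
  unfold Spec_replace_digits_recursive replace_digits_recursive_alt
  rw [replace_digits_recursive.eq_def]
  by_cases hg : (target.toList < "0".toList ∨ "9".toList < target.toList ∨ replacement.toList < "0".toList ∨ "9".toList < replacement.toList)
  · simp only [if_pos hg]
  · simp only [if_neg hg]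
    by_cases hneg : number < 0
    · simp only [if_pos hneg]
      by_cases h0 : -number = 0
      · simp only [if_pos h0]
      · simp only [if_neg h0]
        rw [pv_main target replacement hg (PySem.Int.floordiv (-number) 10)
              (by rw [PySem.Int.floordiv_eq_ediv_of_pos (by omega)]; omega),
            pv_fold_step _ _ (-number) (by omega)]
        norm_num
    · simp only [if_neg hneg]
      by_cases h0 : number = 0
      · simp only [if_pos h0]
      · simp only [if_neg h0]
        rw [pv_main target replacement hg (PySem.Int.floordiv number 10)
              (by rw [PySem.Int.floordiv_eq_ediv_of_pos (by omega)]; omega),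
            pv_fold_step _ _ number (by omega)]
        norm_num
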